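-- pv_equiv track=rewrite | github.com/SUSE/suse-migration-services | suse_migration_services/fstab.py | _sort_by_hierarchy
-- ===== SOURCE A (Python) =====
-- from collections import (
--     namedtuple, OrderedDict
-- )
--
-- def _sort_by_hierarchy(path_list):
--     """
--     Sort given list of path names by their hierachy in the tree
--
--     Example:
--
--     .. code:: python
--
--         result = sort_by_hierarchy(['/var/lib', '/var'])
--
--     :param list path_list: list of path names
--
--     :return: hierachy sorted path_list
--
--     :rtype: list
--     """
--     paths_at_depth = {}
--     for path in path_list:
--         path_elements = path.split('/')
--         path_depth = len(path_elements)
--         if path_depth not in paths_at_depth: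
--             paths_at_depth[path_depth] = []
--         paths_at_depth[path_depth].append(path)
--     ordered_paths_at_depth = OrderedDict(
--         sorted(paths_at_depth.items())
--     )
--     ordered_paths = []
--     for path_depth in ordered_paths_at_depth:
--         for path in ordered_paths_at_depth[path_depth]:
--             ordered_paths.append(path)
--     return ordered_paths
-- ===== SOURCE B (Python) =====
-- def _sort_by_hierarchy(path_list):
--     return sorted(path_list, key=lambda p: len(p.split('/')))
-- ===== Notes on version B (the rewrite author's own statement) =====
-- stated objective: idiomatic
-- what changed: Replaces the depth-bucket dict + OrderedDict over sorted keys + nested concatenation loop with a single stable key-sort by depth (sorted with key=len(p.split('/'))), relying on Timsort's stability for the within-depth order.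
import Mathlib
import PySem

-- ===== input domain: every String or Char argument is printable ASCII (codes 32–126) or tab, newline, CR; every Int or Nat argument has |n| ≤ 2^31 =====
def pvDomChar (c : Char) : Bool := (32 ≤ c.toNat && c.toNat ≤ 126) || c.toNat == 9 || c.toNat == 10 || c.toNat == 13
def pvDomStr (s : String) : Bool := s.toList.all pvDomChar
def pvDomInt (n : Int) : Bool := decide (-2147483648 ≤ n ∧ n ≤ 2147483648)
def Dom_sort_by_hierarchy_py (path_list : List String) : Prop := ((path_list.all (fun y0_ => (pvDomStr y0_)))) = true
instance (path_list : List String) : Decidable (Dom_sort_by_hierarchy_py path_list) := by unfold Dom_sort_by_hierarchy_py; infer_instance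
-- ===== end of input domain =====

-- B replaces A's depth-bucket dict + OrderedDict over sorted keys + nested concatenation loop
-- by a single stable key-sort by path depth (idiomatic; same result, proved below).


-- ===== PORT A =====
-- A-side helper: the body of A's bucket-filling loop
-- (if path_depth not in paths_at_depth: paths_at_depth[path_depth] = []; then .append(path))
def sbhStep (d : PySem.Dict Int (List String)) (path : String) : PySem.Dict Int (List String) :=
  let path_elements := (PySem.Str.split? path "/").getD []  -- sep "/" ≠ "": split? is always `some` (exact)
  let path_depth : Int := path_elements.length
  let d1 := if d.contains path_depth then d else d.insert path_depth ([] : List String)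
  d1.insert path_depth (d1.getD path_depth [] ++ [path])

def sort_by_hierarchy_py (path_list : List String) : List String :=
  let paths_at_depth := path_list.foldl sbhStep PySem.Dict.empty
  -- OrderedDict(sorted(paths_at_depth.items())): the dict's keys are distinct, so Python's
  -- lexicographic pair comparison never reaches the second component; sorting items by the
  -- key alone is exact here.
  let ordered_items := PySem.List.sorted paths_at_depth.items (fun kv => kv.1)
  ordered_items.foldl (fun acc kv => acc ++ kv.2) []

-- ===== PORT B =====
def sort_by_hierarchy_py_alt (path_list : List String) : List String :=
  PySem.List.sorted path_list (fun p => (((PySem.Str.split? p "/").getD []).length : Int))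

-- ===== PRECONDITION & SPEC =====
def Spec_sort_by_hierarchy_py (path_list : List String) (out : List String) : Prop := out = sort_by_hierarchy_py_alt path_list
instance (path_list : List String) (out : List String) : Decidable (Spec_sort_by_hierarchy_py path_list out) := by unfold Spec_sort_by_hierarchy_py; infer_instance

-- ===== CLAIM (what is proved, stated in full; the proofs are below) =====
def Claim_equal_sort_by_hierarchy_py : Prop := ∀ (path_list : List String), Dom_sort_by_hierarchy_py path_list → Spec_sort_by_hierarchy_py path_list (sort_by_hierarchy_py path_list)

-- ===== LEMMAS AND PROOFS =====

-- the depth key both programs sort by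
def dkey (p : String) : Int := ((PySem.Str.split? p "/").getD []).length

-- sorted over a snoc = insert the new element into the sorted prefix
lemma sorted_snoc (xs : List String) (x : String) :
    PySem.List.sorted (xs ++ [x]) dkey
      = PySem.List.insertBy (fun a b => decide (dkey a < dkey b)) x (PySem.List.sorted xs dkey) := by
  rw [PySem.List.sorted_eq_foldl_insertBy, PySem.List.sorted_eq_foldl_insertBy, List.foldl_append]
  rfl

-- filtering one key class through an insertion into a sorted list appends the element at the end
lemma insertBy_filter (x : String) (l : List String)
    (hl : l.Pairwise (fun a b => dkey a ≤ dkey b)) (k : Int) :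
    (PySem.List.insertBy (fun a b => decide (dkey a < dkey b)) x l).filter (fun a => dkey a == k)
      = l.filter (fun a => dkey a == k) ++ (if dkey x == k then [x] else []) := by
  induction l with
  | nil => by_cases h : dkey x = k <;> simp [PySem.List.insertBy, List.filter, h]
  | cons y t ih =>
      rcases List.pairwise_cons.mp hl with ⟨hy, ht⟩
      by_cases h : dkey x < dkey y
      · have hres : PySem.List.insertBy (fun a b => decide (dkey a < dkey b)) x (y :: t)
            = x :: y :: t := by simp [PySem.List.insertBy, h]
        rw [hres]
        by_cases hk : dkey x = k
        · have hempty : (y :: t).filter (fun a => dkey a == k) = [] := by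
            apply List.filter_eq_nil_iff.mpr
            intro a ha
            have : dkey y ≤ dkey a := by
              rcases List.mem_cons.mp ha with h1 | h1
              · exact le_of_eq (congrArg dkey h1).symm
              · exact hy a h1
            simp only [beq_iff_eq]
            omega
          simp [hempty, hk]
        · simp [List.filter_cons, hk]
      · have hres : PySem.List.insertBy (fun a b => decide (dkey a < dkey b)) x (y :: t)
            = y :: PySem.List.insertBy (fun a b => decide (dkey a < dkey b)) x t := by
          simp [PySem.List.insertBy, h]
        rw [hres]
        by_cases hyk : dkey y = k <;>
          simp [hyk, ih ht]

-- stable sorting does not change any single key class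
lemma filter_sorted (xs : List String) (k : Int) :
    (PySem.List.sorted xs dkey).filter (fun a => dkey a == k)
      = xs.filter (fun a => dkey a == k) := by
  induction xs using List.reverseRecOn with
  | nil => simp [PySem.List.sorted_eq_foldl_insertBy]
  | append_singleton xs x ih =>
      rw [sorted_snoc, insertBy_filter x _ (PySem.List.sorted_pairwise xs dkey) k, ih,
        List.filter_append]
      by_cases h : dkey x = k <;> simp [h]

-- two key-sorted lists with the same key classes are equal
lemma eq_of_sorted_filters : ∀ (l₁ l₂ : List String),
    l₁.Pairwise (fun a b => dkey a ≤ dkey b) → l₂.Pairwise (fun a b => dkey a ≤ dkey b) →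
    (∀ k, l₁.filter (fun a => dkey a == k) = l₂.filter (fun a => dkey a == k)) → l₁ = l₂ := by
  intro l₁
  induction l₁ with
  | nil =>
      intro l₂ _ _ hf
      cases l₂ with
      | nil => rfl
      | cons b t₂ =>
          have := hf (dkey b)
          simp at this
  | cons a t₁ ih =>
      intro l₂ h₁ h₂ hf
      cases l₂ with
      | nil =>
          have := hf (dkey a)
          simp at this
      | cons b t₂ =>
          rcases List.pairwise_cons.mp h₁ with ⟨ha, ht₁⟩
          rcases List.pairwise_cons.mp h₂ with ⟨hb, ht₂⟩
          -- key a = key b: each head's key occurs in the other list, whose head key is minimal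
          have hba : dkey b ≤ dkey a := by
            have h := hf (dkey a)
            rw [List.filter_cons_of_pos (by simp)] at h
            have hmem : ∃ c ∈ b :: t₂, dkey c = dkey a := by
              have : a ∈ (b :: t₂).filter (fun c => dkey c == dkey a) := by
                rw [← h]; exact List.mem_cons_self
              rcases List.mem_filter.mp this with ⟨hc, hk⟩
              exact ⟨a, hc, by simp⟩
            rcases hmem with ⟨c, hc, hck⟩
            rcases List.mem_cons.mp hc with h1 | h1
            · exact le_of_eq (h1 ▸ hck)
            · exact le_of_le_of_eq (hb c h1) hck
          have hab : dkey a ≤ dkey b := by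
            have h := hf (dkey b)
            rw [List.filter_cons_of_pos (α := String) (by simp) (l := t₂)] at h
            have hmem : ∃ c ∈ a :: t₁, dkey c = dkey b := by
              have : b ∈ (a :: t₁).filter (fun c => dkey c == dkey b) := by
                rw [h]; exact List.mem_cons_self
              rcases List.mem_filter.mp this with ⟨hc, hk⟩
              exact ⟨b, hc, by simp⟩
            rcases hmem with ⟨c, hc, hck⟩
            rcases List.mem_cons.mp hc with h1 | h1
            · exact le_of_eq (h1 ▸ hck)
            · exact le_of_le_of_eq (ha c h1) hck
          have hk : dkey a = dkey b := le_antisymm hab hba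
          have h := hf (dkey a)
          rw [List.filter_cons_of_pos (by simp), List.filter_cons_of_pos (by simp [hk])] at h
          have hhead : a = b := by exact (List.cons.injEq _ _ _ _ ▸ h).1
          subst hhead
          have htails : ∀ k, t₁.filter (fun c => dkey c == k) = t₂.filter (fun c => dkey c == k) := by
            intro k
            by_cases hka : dkey a = k
            · have := hf k
              rw [List.filter_cons_of_pos (by simp [hka]), List.filter_cons_of_pos (by simp [hka])] at this
              exact (List.cons.injEq _ _ _ _ ▸ this).2
            · have := hf k
              rwa [List.filter_cons_of_neg (by simp [hka]), List.filter_cons_of_neg (by simp [hka])] at this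
          rw [ih t₂ ht₁ ht₂ htails]

-- value of a dict whose items are a map over its (distinct) keys
lemma getD_map (K : List Int) (f : Int → List String) (k : Int) :
    PySem.Dict.getD ⟨K.map (fun j => (j, f j))⟩ k []
      = if k ∈ K then f k else [] := by
  induction K with
  | nil => simp [PySem.Dict.getD, PySem.Dict.get?]
  | cons j K ih =>
      by_cases h : j = k
      · simp [PySem.Dict.getD, PySem.Dict.get?, h]
      · simp only [PySem.Dict.getD, PySem.Dict.get?, List.map_cons,
          List.find?_cons] at ih ⊢
        have hb : ((j, f j).1 == k) = false := by simpa using h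
        rw [hb, ih]
        have hkj : ¬ k = j := fun hh => h hh.symm
        simp [hkj]

-- invariant of A's bucket-filling loop: keys in first-occurrence order, buckets = key classes
lemma dict_items (xs : List String) :
    (xs.foldl sbhStep PySem.Dict.empty).items
      = (PySem.Set.ofList (xs.map dkey)).map (fun k => (k, xs.filter (fun p => dkey p == k))) := by
  induction xs using List.reverseRecOn with
  | nil => simp [PySem.Dict.empty, PySem.Set.ofList]
  | append_singleton xs x ih =>
      rw [List.foldl_append, List.foldl_cons, List.foldl_nil]
      set K := PySem.Set.ofList (xs.map dkey) with hK
      set d := xs.foldl sbhStep PySem.Dict.empty with hdd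
      have hd : d = ⟨K.map (fun k => (k, xs.filter (fun p => dkey p == k)))⟩ :=
        PySem.Dict.ext ih
      have hKnew : PySem.Set.ofList ((xs ++ [x]).map dkey) = PySem.Set.add K (dkey x) := by
        have h1 : (List.map dkey [x]) = [dkey x] := rfl
        rw [List.map_append, PySem.Set.ofList_eq_foldl, List.foldl_append, h1, List.foldl_cons,
          List.foldl_nil, ← PySem.Set.ofList_eq_foldl]
      have hfilt : ∀ j, (xs ++ [x]).filter (fun p => dkey p == j)
          = xs.filter (fun p => dkey p == j) ++ (if dkey x = j then [x] else []) := by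
        intro j
        rw [List.filter_append]
        by_cases h : dkey x = j <;> simp [h]
      have hcont : d.contains (dkey x) = decide (dkey x ∈ K) := by
        rw [hd]
        rw [PySem.Dict.contains_eq_decide_mem_keys, PySem.Dict.keys_mk, List.map_map]
        simp
      have hdk : dkey x = ((PySem.Str.split? x "/").getD []).length := rfl
      by_cases hmem : dkey x ∈ K
      · -- existing depth: the bucket at dkey x gets x appended, all else unchanged
        have hc : d.contains (dkey x) = true := by
          rw [hcont]; simpa using hmem
        have hstep : sbhStep d x = d.insert (dkey x) (d.getD (dkey x) [] ++ [x]) := by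
          simp only [sbhStep, ← hdk]
          rw [if_pos hc]
        rw [hstep]
        have hget : d.getD (dkey x) [] = xs.filter (fun p => dkey p == dkey x) := by
          rw [hd, getD_map, if_pos hmem]
        rw [hget]
        have hcontains : (PySem.Dict.contains d (dkey x)) = true := by rw [hcont]; simpa using hmem
        rw [PySem.Dict.insert, if_pos hcontains, hd]
        have hadd : PySem.Set.add K (dkey x) = K := by
          simp [PySem.Set.add, PySem.Set.contains, hmem]
        rw [hKnew, hadd]
        simp only [List.map_map]
        apply List.map_congr_left
        intro j hj
        by_cases h : j = dkey x
        · subst h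
          simp [hfilt]
        · have hb : (j == dkey x) = false := by simpa using h
          have hj2 : ¬ dkey x = j := fun hh => h hh.symm
          simp [hfilt, hj2]; exact h
      · -- new depth: a fresh empty bucket is created at the end and x appended to it
        have hnox : xs.filter (fun p => dkey p == dkey x) = [] := by
          apply List.filter_eq_nil_iff.mpr
          intro p hp hpk
          exact hmem (hK ▸ (PySem.Set.mem_ofList _ _).mpr
            (List.mem_map.mpr ⟨p, hp, by simpa using hpk⟩))
        have hc : d.contains (dkey x) = false := by
          rw [hcont]; simpa using hmem
        have hstep : sbhStep d x = (d.insert (dkey x) ([] : List String)).insert (dkey x)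
            ((d.insert (dkey x) ([] : List String)).getD (dkey x) [] ++ [x]) := by
          simp only [sbhStep, ← hdk]
          rw [if_neg (by rw [hc]; exact Bool.false_ne_true)]
        rw [hstep]
        have hins : d.insert (dkey x) ([] : List String)
            = ⟨(K ++ [dkey x]).map (fun k => (k, xs.filter (fun p => dkey p == k)))⟩ := by
          apply PySem.Dict.ext
          rw [PySem.Dict.insert]
          have hcontains : (PySem.Dict.contains d (dkey x)) = false := by
            rw [hcont]; simpa using hmem
          rw [hcontains]
          simp only [Bool.false_eq_true, if_false, hd, List.map_append,
            List.map_cons, List.map_nil, hnox]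
        rw [hins]
        have hget : PySem.Dict.getD ⟨(K ++ [dkey x]).map (fun k => (k, xs.filter (fun p => dkey p == k)))⟩ (dkey x) [] = [] := by
          rw [getD_map, if_pos (by simp), hnox]
        rw [hget]
        have hcontains2 : (PySem.Dict.contains (⟨(K ++ [dkey x]).map (fun k => (k, xs.filter (fun p => dkey p == k)))⟩ : PySem.Dict Int (List String)) (dkey x)) = true := by
          rw [PySem.Dict.contains_eq_decide_mem_keys, PySem.Dict.keys_mk, List.map_map]
          simp
        rw [PySem.Dict.insert, if_pos hcontains2]
        have hadd : PySem.Set.add K (dkey x) = K ++ [dkey x] := by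
          simp [PySem.Set.add, PySem.Set.contains, hmem]
        rw [hKnew, hadd]
        simp only [List.map_map]
        apply List.map_congr_left
        intro j hj
        by_cases h : j = dkey x
        · subst h
          simp [hfilt, hnox]
        · have hb : (j == dkey x) = false := by simpa using h
          have hj2 : ¬ dkey x = j := fun hh => h hh.symm
          simp [hfilt, hj2]; exact h

-- A's output in closed form: key classes concatenated along the sorted distinct keys
lemma portA_eq_flatMap (xs : List String) :
    sort_by_hierarchy_py xs
      = (PySem.List.sorted (PySem.Set.ofList (xs.map dkey)) (fun j => j)).flatMap
          (fun k => xs.filter (fun p => dkey p == k)) := by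
  show (PySem.List.sorted (xs.foldl sbhStep PySem.Dict.empty).items (fun kv => kv.1)).foldl
      (fun acc kv => acc ++ kv.2) [] = _
  rw [dict_items]
  have hsort : PySem.List.sorted
        ((PySem.Set.ofList (xs.map dkey)).map (fun k => (k, xs.filter (fun p => dkey p == k))))
        (fun kv => kv.1)
      = (PySem.List.sorted (PySem.Set.ofList (xs.map dkey)) (fun j => j)).map
          (fun k => (k, xs.filter (fun p => dkey p == k))) := by
    apply PySem.List.sorted_eq_of_perm_of_pairwise_lt
    · exact (PySem.List.sorted_perm _ _ false).map _
    · exact (PySem.List.sorted_ofList_pairwise_lt (xs.map dkey)).map _ (fun a b h => h)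
  rw [hsort, PySem.List.foldl_append_eq_flatMap, List.flatMap_map, List.nil_append]

lemma flat_pairwise (xs : List String) :
    ((PySem.List.sorted (PySem.Set.ofList (xs.map dkey)) (fun j => j)).flatMap
        (fun k => xs.filter (fun p => dkey p == k))).Pairwise (fun a b => dkey a ≤ dkey b) := by
  have hg : ∀ (k : Int) (p : String), p ∈ xs.filter (fun q => dkey q == k) → dkey p = k := by
    intro k p hp
    simpa using (List.mem_filter.mp hp).2
  have hpw := PySem.List.sorted_ofList_pairwise_lt (xs.map dkey)
  generalize hks : PySem.List.sorted (PySem.Set.ofList (xs.map dkey)) (fun j => j) = ks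
  rw [hks] at hpw
  clear hks
  induction ks with
  | nil => simp
  | cons k t ih =>
      rcases List.pairwise_cons.mp hpw with ⟨hk, ht⟩
      rw [List.flatMap_cons, List.pairwise_append]
      refine ⟨?_, ih ht, ?_⟩
      · exact List.pairwise_of_forall_mem_list
          (fun a ha b hb => le_of_eq ((hg k a ha).trans (hg k b hb).symm))
      · intro a ha b hb
        rcases List.mem_flatMap.mp hb with ⟨k', hk', hb'⟩
        rw [hg k a ha, hg k' b hb']
        exact le_of_lt (hk k' hk')

lemma flat_filter (xs : List String) (k : Int) :
    ((PySem.List.sorted (PySem.Set.ofList (xs.map dkey)) (fun j => j)).flatMap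
        (fun j => xs.filter (fun p => dkey p == j))).filter (fun a => dkey a == k)
      = xs.filter (fun a => dkey a == k) := by
  rw [List.filter_flatMap]
  have hterm : ∀ j : Int, (xs.filter (fun p => dkey p == j)).filter (fun a => dkey a == k)
      = if j = k then xs.filter (fun a => dkey a == k) else [] := by
    intro j
    rw [List.filter_filter]
    by_cases h : j = k
    · subst h; simp
    · rw [if_neg h]
      apply List.filter_eq_nil_iff.mpr
      intro a _ hc
      rcases (Bool.and_eq_true _ _).mp hc with ⟨h1, h2⟩
      exact h ((by simpa using h2 : dkey a = j) ▸ (by simpa using h1 : dkey a = k))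
  have hflat : ∀ (ks : List Int), ks.Nodup →
      ks.flatMap (fun j => if j = k then xs.filter (fun a => dkey a == k) else [])
        = if k ∈ ks then xs.filter (fun a => dkey a == k) else [] := by
    intro ks
    induction ks with
    | nil => simp
    | cons j t ih =>
        intro hnd
        rcases List.nodup_cons.mp hnd with ⟨hj, ht⟩
        rw [List.flatMap_cons, ih ht]
        by_cases h : j = k
        · subst h
          simp [hj]
        · have hkj : ¬ k = j := fun hh => h hh.symm
          simp [h, hkj]
  simp only [hterm]
  have hnd : (PySem.List.sorted (PySem.Set.ofList (xs.map dkey)) (fun j => j)).Nodup :=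
    (PySem.List.sorted_ofList_pairwise_lt (xs.map dkey)).imp (fun h => ne_of_lt h)
  rw [hflat _ hnd]
  by_cases hmem : k ∈ PySem.List.sorted (PySem.Set.ofList (xs.map dkey)) (fun j => j)
  · rw [if_pos hmem]
  · rw [if_neg hmem]
    symm
    apply List.filter_eq_nil_iff.mpr
    intro p hp hpk
    apply hmem
    rw [PySem.List.mem_sorted]
    exact (PySem.Set.mem_ofList _ _).mpr (List.mem_map.mpr ⟨p, hp, by simpa using hpk⟩)

-- ===== VERDICT (by name: the statement is the Claim_ definition above) =====
theorem sort_by_hierarchy_py_spec : Claim_equal_sort_by_hierarchy_py := by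
  intro xs _
  show sort_by_hierarchy_py xs = sort_by_hierarchy_py_alt xs
  have hB : sort_by_hierarchy_py_alt xs = PySem.List.sorted xs dkey := rfl
  rw [hB, portA_eq_flatMap]
  exact eq_of_sorted_filters _ _ (flat_pairwise xs) (PySem.List.sorted_pairwise xs dkey)
    (fun k => (flat_filter xs k).trans (filter_sorted xs k).symm)
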